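-- pv_equiv track=rewrite | github.com/Wultur/BashImRandBot | parser.py | quoteToString
-- ===== SOURCE A (Python) =====
-- def quoteToString(inputList):
--     output = ''
--     for i in range(len(inputList)):
--         if i == 0:
--             output += str(inputList[i]).strip()
--         elif str(inputList[i]) == '<br/>':
--             output += '\n'
--         elif str(inputList[i]).strip()[0:4] == '<div':
--             break
--         else:
--             output += str(inputList[i])
--     return output
-- ===== SOURCE B (Python) =====
-- def quoteToString(inputList):
--     n = len(inputList)
--     cutoff = next((i for i, item in enumerate(inputList)
--                    if i >= 1 and str(item).strip()[0:4] == '<div'), n)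
--     return ''.join(
--         str(item).strip() if i == 0 else
--         '\n' if str(item) == '<br/>' else
--         str(item)
--         for i, item in enumerate(inputList[:cutoff]))
-- ===== Notes on version B (the rewrite author's own statement) =====
-- stated objective: alternative
-- what changed: B replaces A's single accumulate-and-break loop with two passes: first compute the '<div' cutoff index, then map each prefix position to its string piece and ''.join them.
import Mathlib
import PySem

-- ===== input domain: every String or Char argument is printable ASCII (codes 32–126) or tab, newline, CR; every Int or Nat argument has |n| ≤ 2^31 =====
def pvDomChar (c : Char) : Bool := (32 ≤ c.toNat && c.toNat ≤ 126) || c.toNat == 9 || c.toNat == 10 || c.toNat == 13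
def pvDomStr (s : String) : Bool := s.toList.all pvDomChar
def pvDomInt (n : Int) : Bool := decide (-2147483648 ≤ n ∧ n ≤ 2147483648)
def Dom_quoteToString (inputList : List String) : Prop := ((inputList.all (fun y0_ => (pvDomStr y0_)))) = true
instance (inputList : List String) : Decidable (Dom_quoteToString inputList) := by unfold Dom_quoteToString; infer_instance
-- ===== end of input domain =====

-- B joins a mapped prefix ending at a precomputed '<div' cutoff instead of A's single
-- accumulate-and-break loop (objective: alternative decomposition, same cost).

-- shared helper: str(item).strip()[0:4] == '<div'
def isDiv (s : String) : Bool := PySem.Str.slice (PySem.Str.strip s) (some 0) (some 4) == "<div"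

-- ===== PORT A =====
def quoteA_loop : List String → Int → String → String
  | [], _, out => out
  | x :: xs, i, out =>
    if i = 0 then quoteA_loop xs (i + 1) (out ++ PySem.Str.strip x)
    else if x = "<br/>" then quoteA_loop xs (i + 1) (out ++ "\n")
    else if isDiv x then out
    else quoteA_loop xs (i + 1) (out ++ x)

def quoteToString (inputList : List String) : String :=
  quoteA_loop inputList 0 ""

-- ===== PORT B =====
def renderB (p : Int × String) : String :=
  if p.1 = 0 then PySem.Str.strip p.2
  else if p.2 = "<br/>" then "\n"
  else p.2

def quoteToString_alt (inputList : List String) : String :=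
  let n : Int := inputList.length
  let cutoff : Int :=
    match (PySem.List.enumerate inputList 0).find?
        (fun p => decide (1 ≤ p.1) && isDiv p.2) with
    | some p => p.1
    | none => n
  PySem.Str.join ""
    ((PySem.List.enumerate (PySem.List.slice inputList (some 0) (some cutoff)) 0).map renderB)

-- ===== PRECONDITION & SPEC =====
def Spec_quoteToString (inputList : List String) (out : String) : Prop := out = quoteToString_alt inputList
instance (inputList : List String) (out : String) : Decidable (Spec_quoteToString inputList out) := by unfold Spec_quoteToString; infer_instance

-- ===== CLAIM (what is proved, stated in full; the proofs are below) =====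
def Claim_equal_quoteToString : Prop := ∀ (inputList : List String), Dom_quoteToString inputList → Spec_quoteToString inputList (quoteToString inputList)

-- ===== LEMMAS AND PROOFS =====

-- fused specification of what both programs append after the head
def tailSpec : List String → List Char
  | [] => []
  | x :: xs =>
    if isDiv x then []
    else (if x = "<br/>" then '\n' :: [] else x.toList) ++ tailSpec xs

-- first '<div' index in a list (no offset), else length
def cutIdx (xs : List String) : Nat :=
  match xs.findIdx? isDiv with
  | some k => k
  | none => xs.length

lemma loopA_toList (xs : List String) : ∀ (i : Int) (out : String), 1 ≤ i →
    (quoteA_loop xs i out).toList = out.toList ++ tailSpec xs := by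
  induction xs with
  | nil => intro i out _; simp [quoteA_loop, tailSpec]
  | cons x xs ih =>
    intro i out hi
    have hi0 : ¬ i = 0 := by omega
    rw [quoteA_loop]
    rw [if_neg hi0]
    by_cases hbr : x = "<br/>"
    · have hdiv : isDiv x = false := by subst hbr; decide
      subst hbr
      simp [tailSpec, hdiv, ih (i + 1) _ (by omega)]
    · rw [if_neg hbr]
      by_cases hd : isDiv x
      · simp [tailSpec, hd]
      · simp [tailSpec, hbr, hd, ih (i + 1) _ (by omega)]

lemma intercalate_nil_eq_flatten (l : List (List Char)) :
    List.intercalate [] l = l.flatten := by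
  induction l with
  | nil => simp [List.intercalate]
  | cons a l ih =>
    cases l with
    | nil => simp [List.intercalate]
    | cons b m => simp [List.intercalate, List.intersperse] at *; simpa using ih

lemma joinE_toList (l : List String) :
    (PySem.Str.join "" l).toList = (l.map String.toList).flatten := by
  simp [PySem.Str.join, PySem.Chars.join, intercalate_nil_eq_flatten]

lemma find?_drop_ge (xs : List String) : ∀ (s : Int), 1 ≤ s →
    (PySem.List.enumerate xs s).find? (fun p => decide (1 ≤ p.1) && isDiv p.2)
      = (PySem.List.enumerate xs s).find? (fun p => isDiv p.2) := by
  induction xs with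
  | nil => intro s _; simp [PySem.List.enumerate_nil]
  | cons x xs ih =>
    intro s hs
    rw [PySem.List.enumerate_cons]
    by_cases hd : isDiv x
    · rw [List.find?_cons_of_pos (by simp [hd, hs]),
        List.find?_cons_of_pos (by simp [hd])]
    · rw [List.find?_cons_of_neg (by simp [hd]),
        List.find?_cons_of_neg (by simp [hd]), ih (s + 1) (by omega)]

lemma cutIdx_cons (x : String) (xs : List String) :
    cutIdx (x :: xs) = if isDiv x then 0 else cutIdx xs + 1 := by
  by_cases hd : isDiv x
  · simp [cutIdx, List.findIdx?_cons, hd]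
  · simp only [cutIdx, List.findIdx?_cons, hd]
    cases h : xs.findIdx? isDiv <;> simp

lemma find?_cut (xs : List String) : ∀ (s : Nat),
    (((PySem.List.enumerate xs (s : Int)).find? (fun p => isDiv p.2)).elim
        ((s + xs.length : Nat) : Int) (·.1)) = ((s + cutIdx xs : Nat) : Int) := by
  induction xs with
  | nil => intro s; simp [PySem.List.enumerate_nil, cutIdx]
  | cons x xs ih =>
    intro s
    rw [PySem.List.enumerate_cons, cutIdx_cons]
    by_cases hd : isDiv x
    · rw [List.find?_cons_of_pos (by simp [hd])]; simp [hd]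
    · rw [List.find?_cons_of_neg (by simp [hd])]
      have := ih (s + 1)
      push_cast at this ⊢
      simpa [hd, add_assoc, add_comm, add_left_comm] using this

lemma join_tail (xs : List String) : ∀ (s : Int), 1 ≤ s →
    (PySem.Str.join "" ((PySem.List.enumerate (xs.take (cutIdx xs)) s).map renderB)).toList
      = tailSpec xs := by
  induction xs with
  | nil => intro s _; simp [cutIdx, PySem.List.enumerate_nil, tailSpec]
  | cons x xs ih =>
    intro s hs
    rw [cutIdx_cons]
    by_cases hd : isDiv x
    · simp [hd, PySem.List.enumerate_nil, tailSpec]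
    · rw [if_neg hd, List.take_succ_cons, PySem.List.enumerate_cons]
      have hs0 : ¬ s = 0 := by omega
      rw [tailSpec, if_neg hd, List.map_cons, joinE_toList, List.map_cons,
        List.flatten_cons, ← joinE_toList, ih (s + 1) (by omega)]
      by_cases hbr : x = "<br/>" <;> simp [renderB, hs0, hbr]

-- ===== VERDICT (by name: the statement is the Claim_ definition above) =====
theorem quoteToString_spec : Claim_equal_quoteToString := by
  intro l _
  unfold Spec_quoteToString
  cases l with
  | nil => decide
  | cons x xs =>
    apply String.toList_inj.mp
    -- A side
    rw [quoteToString, quoteA_loop, if_pos rfl]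
    norm_num
    rw [loopA_toList xs 1 _ (by omega)]
    -- B side
    rw [quoteToString_alt]
    simp only [PySem.List.enumerate_cons, zero_add]
    rw [List.find?_cons_of_neg (by simp), find?_drop_ge xs 1 (by omega)]
    have hc := find?_cut xs 1
    norm_num at hc
    rcases h : (PySem.List.enumerate xs (1 : Int)).find? (fun p => isDiv p.2) with _ | p <;>
      rw [h] at hc <;> simp only [Option.elim] at hc <;> rw [h]
    · have hlen : ((x :: xs).length : Int) = ((cutIdx xs + 1 : Nat) : Int) := by
        simp only [List.length_cons]
        push_cast
        omega
      rw [hlen, PySem.List.slice_zero_start, PySem.List.slice_to_natCast,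
        List.take_succ_cons, PySem.List.enumerate_cons, List.map_cons, joinE_toList,
        List.map_cons, List.flatten_cons, List.map_map]
      have ht := join_tail xs 1 (by omega)
      rw [joinE_toList, List.map_map] at ht
      rw [zero_add, ht]
      simp [renderB]
    · have hp : p.1 = ((cutIdx xs + 1 : Nat) : Int) := by push_cast; omega
      rw [show (match some p with
            | some q => q.1
            | none => (((x :: xs).length : Nat) : Int)) = p.1 from rfl,
        hp, PySem.List.slice_zero_start, PySem.List.slice_to_natCast,
        List.take_succ_cons, PySem.List.enumerate_cons, List.map_cons, joinE_toList,
        List.map_cons, List.flatten_cons, List.map_map]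
      have ht := join_tail xs 1 (by omega)
      rw [joinE_toList, List.map_map] at ht
      rw [zero_add, ht]
      simp [renderB]
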